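-- pv_equiv track=rewrite | github.com/labradorsedsota/cua-data-collection | scripts/fix_unknown_framework_p2.py | detect_from_topics
-- ===== SOURCE A (Python) =====
-- def detect_from_topics(topics):
--     """Detect framework from GitHub topics."""
--     topics_lower = [t.lower() for t in topics]
--     for topic, fw in [("nextjs", "Next.js"), ("nuxtjs", "Nuxt"), ("nuxt", "Nuxt"),
--                        ("gatsby", "Gatsby"), ("remix", "Remix"), ("sveltekit", "SvelteKit"),
--                        ("reactjs", "React"), ("react", "React"),
--                        ("vuejs", "Vue"), ("vue", "Vue"),
--                        ("angular", "Angular"),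
--                        ("svelte", "Svelte"), ("solidjs", "Solid"), ("lit", "Lit")]:
--         if topic in topics_lower:
--             return fw
--     return None
-- ===== SOURCE B (Python) =====
-- _PRIORITY = {
--     "nextjs": (0, "Next.js"), "nuxtjs": (1, "Nuxt"), "nuxt": (2, "Nuxt"),
--     "gatsby": (3, "Gatsby"), "remix": (4, "Remix"), "sveltekit": (5, "SvelteKit"),
--     "reactjs": (6, "React"), "react": (7, "React"),
--     "vuejs": (8, "Vue"), "vue": (9, "Vue"),
--     "angular": (10, "Angular"),
--     "svelte": (11, "Svelte"), "solidjs": (12, "Solid"), "lit": (13, "Lit"),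
-- }
--
-- def detect_from_topics(topics):
--     """Detect framework from GitHub topics."""
--     best = None
--     for t in topics:
--         entry = _PRIORITY.get(t.lower())
--         if entry is not None and (best is None or entry[0] < best[0]):
--             best = entry
--     return best[1] if best is not None else None
-- ===== Notes on version B (the rewrite author's own statement) =====
-- stated objective: alternative
-- what changed: Replaces the scan over the fixed candidate list with membership tests in the topic list by a single pass over the input topics, keeping the minimum-priority entry found in a precomputed topic->(rank, framework) dict.
import Mathlib
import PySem

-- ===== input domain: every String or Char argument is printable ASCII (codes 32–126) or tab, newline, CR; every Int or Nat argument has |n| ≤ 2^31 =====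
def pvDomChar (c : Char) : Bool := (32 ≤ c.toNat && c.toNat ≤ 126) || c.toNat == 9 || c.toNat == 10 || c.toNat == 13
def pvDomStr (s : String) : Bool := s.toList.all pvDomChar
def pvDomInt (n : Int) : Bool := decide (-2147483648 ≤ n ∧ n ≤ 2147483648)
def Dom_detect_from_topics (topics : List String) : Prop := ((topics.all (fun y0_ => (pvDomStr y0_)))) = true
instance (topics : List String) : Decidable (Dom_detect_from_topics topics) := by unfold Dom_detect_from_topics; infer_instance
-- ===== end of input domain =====

-- B replaces A's scan of the fixed candidate list by one pass over the topics keeping the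
-- minimum-priority entry from a precomputed topic -> (rank, framework) dict (objective: alternative).

-- ===== PORT A =====
def pairsA : List (String × String) :=
  [("nextjs", "Next.js"), ("nuxtjs", "Nuxt"), ("nuxt", "Nuxt"),
   ("gatsby", "Gatsby"), ("remix", "Remix"), ("sveltekit", "SvelteKit"),
   ("reactjs", "React"), ("react", "React"),
   ("vuejs", "Vue"), ("vue", "Vue"),
   ("angular", "Angular"),
   ("svelte", "Svelte"), ("solidjs", "Solid"), ("lit", "Lit")]

-- the 'for topic, fw in …: if topic in topics_lower: return fw' loop
def goA (tl : List String) : List (String × String) → Option String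
  | [] => none
  | (t, fw) :: rest => if t ∈ tl then some fw else goA tl rest

def detect_from_topics (topics : List String) : Option String :=
  goA (topics.map PySem.Str.lower) pairsA

-- ===== PORT B =====
def prioB : PySem.Dict String (Int × String) :=
  PySem.Dict.mk
    [("nextjs", (0, "Next.js")), ("nuxtjs", (1, "Nuxt")), ("nuxt", (2, "Nuxt")),
     ("gatsby", (3, "Gatsby")), ("remix", (4, "Remix")), ("sveltekit", (5, "SvelteKit")),
     ("reactjs", (6, "React")), ("react", (7, "React")),
     ("vuejs", (8, "Vue")), ("vue", (9, "Vue")),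
     ("angular", (10, "Angular")),
     ("svelte", (11, "Svelte")), ("solidjs", (12, "Solid")), ("lit", (13, "Lit"))]

-- loop body: entry = _PRIORITY.get(t.lower()); keep the entry of minimal rank
def stepB (best : Option (Int × String)) (t : String) : Option (Int × String) :=
  match PySem.Dict.get? prioB (PySem.Str.lower t) with
  | none => best
  | some e =>
    match best with
    | none => some e
    | some b => if e.1 < b.1 then some e else some b

def detect_from_topics_alt (topics : List String) : Option String :=
  (topics.foldl stepB none).map Prod.snd

-- ===== PRECONDITION & SPEC =====
def Spec_detect_from_topics (topics : List String) (out : Option String) : Prop := out = detect_from_topics_alt topics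
instance (topics : List String) (out : Option String) : Decidable (Spec_detect_from_topics topics out) := by unfold Spec_detect_from_topics; infer_instance

-- ===== CLAIM (what is proved, stated in full; the proofs are below) =====
def Claim_equal_detect_from_topics : Prop := ∀ (topics : List String), Dom_detect_from_topics topics → Spec_detect_from_topics topics (detect_from_topics topics)

-- ===== LEMMAS AND PROOFS =====

-- step on an already-lowered string
def stepB' (best : Option (Int × String)) (s : String) : Option (Int × String) :=
  match PySem.Dict.get? prioB s with
  | none => best
  | some e =>
    match best with
    | none => some e
    | some b => if e.1 < b.1 then some e else some b

-- first candidate entry whose key occurs in L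
def findP (L : List String) : Option (String × (Int × String)) :=
  prioB.items.find? (fun e => decide (e.1 ∈ L))

theorem find?_congr_mem {α : Type} (l : List α) (p q : α → Bool)
    (h : ∀ a ∈ l, p a = q a) : l.find? p = l.find? q := by
  induction l with
  | nil => rfl
  | cons a l ih =>
    simp only [List.find?_cons, h a (by simp)]
    cases q a <;> simp [ih (fun a ha => h a (by simp [ha]))]

theorem get?_none_not_key (s : String) (h : PySem.Dict.get? prioB s = none) :
    ∀ e ∈ prioB.items, e.1 ≠ s := by
  intro e he hes
  subst hes
  fin_cases he <;> revert h <;> decide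

theorem find?_key_of_mem {ν : Type} (l : List (String × ν)) (k : String) (v : ν)
    (hnd : (l.map Prod.fst).Nodup) (h : (k, v) ∈ l) :
    l.find? (fun e => e.1 == k) = some (k, v) := by
  induction l with
  | nil => simp at h
  | cons a l ih =>
    rcases List.mem_cons.mp h with h | h
    · subst h; simp
    · have hk : k ∈ l.map Prod.fst := List.mem_map.mpr ⟨(k, v), h, rfl⟩
      have hne : a.1 ≠ k := by
        intro he; exact (List.nodup_cons.mp hnd).1 (he ▸ hk)
      rw [List.find?_cons_of_neg (by simp [hne])]
      exact ih (List.nodup_cons.mp hnd).2 h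

theorem key_lemma (ps : List (String × (Int × String))) (L : List String)
    (s : String) (e0 : Int × String)
    (hfst : ps.find? (fun e => e.1 == s) = some (s, e0))
    (hsorted : ps.Pairwise (fun a b => a.2.1 < b.2.1)) :
    (match (ps.find? (fun e => decide (e.1 ∈ L))).map Prod.snd with
     | none => some e0
     | some b => if e0.1 < b.1 then some e0 else some b)
    = (ps.find? (fun e => decide (e.1 ∈ L ++ [s]))).map Prod.snd := by
  induction ps with
  | nil => simp at hfst
  | cons a ps ih =>
    rcases List.pairwise_cons.mp hsorted with ⟨hlt, htail⟩
    by_cases has : a.1 = s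
    · have hae : a = (s, e0) := by
        have := hfst
        rw [List.find?_cons_of_pos (by simp [has])] at this
        exact Option.some.inj this
      have hsL' : a.1 ∈ L ++ [s] := by simp [has]
      rw [List.find?_cons_of_pos (p := fun (e : String × Int × String) => decide (e.1 ∈ L ++ [s])) (by simp [hsL'])]
      by_cases haL : a.1 ∈ L
      · rw [List.find?_cons_of_pos (p := fun (e : String × Int × String) => decide (e.1 ∈ L)) (by simp [haL])]
        simp [hae]
      · rw [List.find?_cons_of_neg (p := fun (e : String × Int × String) => decide (e.1 ∈ L)) (by simp [haL])]
        cases hfind : ps.find? (fun e => decide (e.1 ∈ L)) with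
        | none => simp [hae]
        | some b =>
          have hb : b ∈ ps := List.mem_of_find?_eq_some hfind
          have : e0.1 < b.2.1 := by
            have := hlt b hb
            rw [hae] at this
            exact this
          simp [hae, this]
    · have hfst' : ps.find? (fun e => e.1 == s) = some (s, e0) := by
        have := hfst
        rw [List.find?_cons_of_neg (by simp [has])] at this
        exact this
      by_cases haL : a.1 ∈ L
      · have hsL' : a.1 ∈ L ++ [s] := by simp [haL]
        rw [List.find?_cons_of_pos (p := fun (e : String × Int × String) => decide (e.1 ∈ L)) (by simp [haL]),
            List.find?_cons_of_pos (p := fun (e : String × Int × String) => decide (e.1 ∈ L ++ [s])) (by simp [hsL'])]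
        have hmem : (s, e0) ∈ ps := List.mem_of_find?_eq_some hfst'
        have : a.2.1 < e0.1 := by
          have := hlt (s, e0) hmem
          exact this
        simp [not_lt_of_gt this]
      · have hnL' : a.1 ∉ L ++ [s] := by simp [haL, has]
        rw [List.find?_cons_of_neg (p := fun (e : String × Int × String) => decide (e.1 ∈ L)) (by simp [haL]),
            List.find?_cons_of_neg (p := fun (e : String × Int × String) => decide (e.1 ∈ L ++ [s])) (by simp [hnL'])]
        exact ih hfst' htail

theorem get?_find? (s : String) (e0 : Int × String)
    (hs : PySem.Dict.get? prioB s = some e0) :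
    prioB.items.find? (fun e => e.1 == s) = some (s, e0) := by
  have hmem : (s, e0) ∈ prioB.items := PySem.Dict.mem_items_of_get?_eq_some _ hs
  exact find?_key_of_mem _ _ _ (by decide) hmem

theorem prio_sorted : prioB.items.Pairwise (fun a b => a.2.1 < b.2.1) := by
  decide

theorem stepB_snoc (L : List String) (s : String) :
    stepB' ((findP L).map Prod.snd) s = (findP (L ++ [s])).map Prod.snd := by
  cases hs : PySem.Dict.get? prioB s with
  | none =>
    have hcong : findP (L ++ [s]) = findP L := by
      apply find?_congr_mem
      intro e he
      have := get?_none_not_key s hs e he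
      simp [List.mem_append, this]
    simp [stepB', hs, hcong]
  | some e0 =>
    have h := key_lemma prioB.items L s e0 (get?_find? s e0 hs) prio_sorted
    simp only [findP]
    rw [← h]
    unfold stepB'
    rw [hs]

theorem foldB_eq_findP (L : List String) :
    L.foldl stepB' none = (findP L).map Prod.snd := by
  induction L using List.reverseRecOn with
  | nil => decide
  | append_singleton L s ih =>
    rw [List.foldl_append, List.foldl_cons, List.foldl_nil, ih, stepB_snoc]

theorem goA_eq_gen (L : List String) (ps : List (String × (Int × String))) :
    goA L (ps.map (fun e => (e.1, e.2.2)))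
      = (ps.find? (fun e => decide (e.1 ∈ L))).map (fun e => e.2.2) := by
  induction ps with
  | nil => rfl
  | cons a ps ih =>
    by_cases h : a.1 ∈ L
    · rw [List.map_cons]
      rw [List.find?_cons_of_pos (p := fun (e : String × Int × String) => decide (e.1 ∈ L)) (by simp [h])]
      simp [goA, h]
    · rw [List.map_cons]
      simp only [goA, if_neg h]
      rw [List.find?_cons_of_neg (p := fun (e : String × Int × String) => decide (e.1 ∈ L)) (by simp [h])]
      exact ih

theorem pairsA_eq : pairsA = prioB.items.map (fun e => (e.1, e.2.2)) := by decide

theorem goA_eq_findP (L : List String) :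
    goA L pairsA = (findP L).map (fun e => e.2.2) := by
  rw [pairsA_eq, goA_eq_gen]
  rfl

-- ===== VERDICT (by name: the statement is the Claim_ definition above) =====
theorem detect_from_topics_spec : Claim_equal_detect_from_topics := by
  intro topics _
  unfold Spec_detect_from_topics detect_from_topics detect_from_topics_alt
  have hmap : topics.foldl stepB none
      = (topics.map PySem.Str.lower).foldl stepB' none := by
    rw [List.foldl_map]
    rfl
  rw [hmap, foldB_eq_findP, goA_eq_findP]
  cases findP (topics.map PySem.Str.lower) <;> rfl
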